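-- pv_equiv track=rewrite | github.com/Jaybagrecha/Python-Programming | guessmovie.py | create_qn
-- ===== SOURCE A (Python) =====
-- def create_qn(movie):
--     n=len(movie)    # to open movie('movies list') in a list of characters
--     letters=list(movie)
--     temp=[]
--     for i in range(n):
--         if letters[i]==' ':
--             temp.append(' ')
--         else:
--             temp.append('*')
--     qn=''.join(str(x) for x in temp)
--     return qn
-- ===== SOURCE B (Python) =====
-- def create_qn(movie):
--     # Simpler decomposition: split on each space, mask whole words, rejoin.
--     return ' '.join('*' * len(word) for word in movie.split(' '))
-- ===== Notes on version B (the rewrite author's own statement) =====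
-- stated objective: simpler
-- what changed: Replaces the per-character index loop, temp list and character-wise join with splitting on spaces, mapping each word to a run of asterisks of its length, and rejoining with single spaces.
import Mathlib
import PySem

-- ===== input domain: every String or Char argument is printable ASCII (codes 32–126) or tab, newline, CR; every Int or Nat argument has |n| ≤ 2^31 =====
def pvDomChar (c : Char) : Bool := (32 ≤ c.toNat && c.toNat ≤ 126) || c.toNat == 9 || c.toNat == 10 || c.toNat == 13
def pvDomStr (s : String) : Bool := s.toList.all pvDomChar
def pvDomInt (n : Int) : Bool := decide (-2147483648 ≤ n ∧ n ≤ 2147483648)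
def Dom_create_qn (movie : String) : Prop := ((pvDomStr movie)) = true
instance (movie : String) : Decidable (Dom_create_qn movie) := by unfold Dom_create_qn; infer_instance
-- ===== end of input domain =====

-- B replaces the per-character index loop with split-on-space / mask-each-word / rejoin (simpler decomposition).


-- ===== PORT A =====
def create_qn (movie : String) : String :=
  let n := PySem.Str.len movie
  let letters := movie.toList
  let temp : List String :=
    (PySem.List.pyRange 0 n 1).foldl (fun temp i =>
      match PySem.List.pyGet? letters i with
      | some c => if c = ' ' then temp ++ [" "] else temp ++ ["*"]
      | none => temp) []      -- none is unreachable: i ranges over valid indices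
  PySem.Str.join "" temp      -- str(x) of a str is x itself

-- ===== PORT B =====
def create_qn_alt (movie : String) : String :=
  match PySem.Str.split? movie " " with
  | some words =>
      PySem.Str.join " " (words.map (fun w => String.ofList (List.replicate (PySem.Str.len w).toNat '*')))
  | none => ""                -- unreachable: the separator " " is nonempty

-- ===== PRECONDITION & SPEC =====
def Spec_create_qn (movie : String) (out : String) : Prop := out = create_qn_alt movie
instance (movie : String) (out : String) : Decidable (Spec_create_qn movie out) := by unfold Spec_create_qn; infer_instance

-- ===== CLAIM (what is proved, stated in full; the proofs are below) =====
def Claim_equal_create_qn : Prop := ∀ (movie : String), Dom_create_qn movie → Spec_create_qn movie (create_qn movie)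

-- ===== LEMMAS AND PROOFS =====

-- the per-character mask both programs compute
def pvMask (c : Char) : Char := if c = ' ' then ' ' else '*'

-- splitOn.go with a single-char separator computes List.splitOnP
theorem pv_go_spec (fuel : Nat) (l cur : List Char) (acc : List (List Char))
    (h : l.length ≤ fuel) :
    PySem.Chars.splitOn.go [' '] fuel l cur acc
      = acc.reverse ++ (List.splitOnP (· == ' ') l).modifyHead (cur.reverse ++ ·) := by
  induction fuel generalizing l cur acc with
  | zero =>
      have hl : l = [] := List.eq_nil_of_length_eq_zero (Nat.le_zero.mp h)
      subst hl
      rw [PySem.Chars.splitOn.go.eq_def]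
      simp [List.splitOnP_nil]
  | succ fuel ih =>
      cases l with
      | nil =>
          rw [PySem.Chars.splitOn.go.eq_def]
          simp [List.splitOnP_nil]
      | cons c rest =>
          rw [PySem.Chars.splitOn.go.eq_def]
          have hr : rest.length ≤ fuel := by simpa using Nat.le_of_succ_le_succ h
          simp only [List.isPrefixOf, Bool.and_true,
            List.splitOnP_cons]
          by_cases hc : c = ' '
          · simp only [hc, beq_self_eq_true, if_pos]
            rw [ih _ _ _ (by simpa using hr)]
            have hid : List.modifyHead (fun x : List Char => x) = id := by
              funext l; cases l <;> rfl
            simp [hid]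
          · simp only [show (' ' == c) = false by simp [Ne.symm hc],
              show (c == ' ') = false by simp [hc], Bool.false_eq_true, if_false]
            rw [ih _ _ _ hr]
            obtain ⟨w, ws, hw⟩ := List.exists_cons_of_ne_nil (List.splitOnP_ne_nil (· == ' ') rest)
            simp [hw]

theorem pv_splitOn_eq (cs : List Char) :
    PySem.Chars.splitOn cs [' '] = List.splitOnP (· == ' ') cs := by
  unfold PySem.Chars.splitOn
  rw [pv_go_spec _ _ _ _ (Nat.le_succ _)]
  obtain ⟨w, ws, hw⟩ := List.exists_cons_of_ne_nil (List.splitOnP_ne_nil (· == ' ') cs)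
  simp [hw]

-- masking each split word and rejoining with one space = masking every character
theorem pv_join_mask (cs : List Char) :
    PySem.Chars.join [' ']
        ((List.splitOnP (· == ' ') cs).map (fun w => List.replicate w.length '*'))
      = cs.map pvMask := by
  induction cs with
  | nil => simp [List.splitOnP_nil, PySem.Chars.join_singleton]
  | cons c rest ih =>
      obtain ⟨w, ws, hw⟩ := List.exists_cons_of_ne_nil (List.splitOnP_ne_nil (· == ' ') rest)
      rw [hw] at ih
      rw [List.splitOnP_cons]
      by_cases hc : c = ' '
      · rw [if_pos (by simp [hc]), hw, List.map_cons, List.map_cons,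
          PySem.Chars.join_cons_cons]
        simp only [List.map_cons] at ih
        rw [ih]
        simp [pvMask, hc]
      · rw [if_neg (by simp [hc]), hw, List.modifyHead_cons]
        cases ws with
        | nil =>
            rw [List.map_singleton, PySem.Chars.join_singleton] at ih ⊢
            simp [List.replicate_succ, pvMask, hc, ih]
        | cons q qs =>
            rw [List.map_cons, List.map_cons, PySem.Chars.join_cons_cons] at ih ⊢
            simp [List.replicate_succ, pvMask, hc, ih]

-- A's loop over indices produces the per-character mask as a list of singleton strings
theorem pv_A_toList (movie : String) :
    (create_qn movie).toList = movie.toList.map pvMask := by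
  have hcong :
      (PySem.List.pyRange 0 (PySem.Str.len movie) 1).foldl (fun temp i =>
          match PySem.List.pyGet? movie.toList i with
          | some c => if c = ' ' then temp ++ [" "] else temp ++ ["*"]
          | none => temp) []
        = (PySem.List.pyRange 0 (PySem.Str.len movie) 1).foldl (fun temp i =>
            temp ++ [if PySem.List.pyGetD movie.toList i ' ' = ' ' then " " else "*"]) [] := by
    apply PySem.List.foldl_congr_mem
    intro acc i hi
    have hb := (PySem.List.mem_pyRange_one.mp hi)
    rw [PySem.Str.len_eq] at hb
    have hlt : i < (movie.toList.length : Int) := hb.2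
    rw [PySem.List.pyGet?_eq_some_getElem _ hb.1 hlt,
      PySem.List.pyGetD_of_nonneg _ _ hb.1,
      List.getD_eq_getElem _ _ (by omega)]
    by_cases h : movie.toList[i.toNat] = ' ' <;> simp [h]
  have hdef : create_qn movie = PySem.Str.join ""
      ((PySem.List.pyRange 0 (PySem.Str.len movie) 1).foldl (fun temp i =>
        match PySem.List.pyGet? movie.toList i with
        | some c => if c = ' ' then temp ++ [" "] else temp ++ ["*"]
        | none => temp) []) := rfl
  rw [hdef, hcong, PySem.Str.len_eq,
    PySem.List.foldl_pyRange_zero_pyGetD' movie.toList ' '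
      (fun acc c => acc ++ [if c = ' ' then " " else "*"]) [],
    PySem.List.foldl_append_singleton_eq_map, List.nil_append,
    PySem.Str.toList_join]
  have : (movie.toList.map (fun c => if c = ' ' then " " else "*")).map String.toList
      = movie.toList.map (fun c => [pvMask c]) := by
    simp only [List.map_map]
    refine List.map_congr_left (fun c _ => ?_)
    by_cases hc : c = ' ' <;> simp [hc, pvMask]
  rw [this]
  simpa using PySem.Chars.join_nil_singletons (movie.toList.map pvMask)

-- ===== VERDICT (by name: the statement is the Claim_ definition above) =====
theorem create_qn_spec : Claim_equal_create_qn := by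
  intro movie _
  unfold Spec_create_qn
  apply String.toList_inj.mp
  rw [pv_A_toList]
  unfold create_qn_alt
  have hsplit := PySem.Str.split?_map movie " "
  cases hws : PySem.Str.split? movie " " with
  | none => simp [hws, PySem.Chars.split?] at hsplit
  | some words =>
      rw [hws] at hsplit
      simp only [PySem.Chars.split?] at hsplit
      have hwords : words.map String.toList = PySem.Chars.splitOn movie.toList [' '] := by
        simpa using hsplit
      rw [PySem.Str.toList_join]
      have hmap : (words.map (fun w => String.ofList (List.replicate (PySem.Str.len w).toNat '*'))).map
            String.toList
          = (words.map String.toList).map (fun w => List.replicate w.length '*') := by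
        simp only [List.map_map]
        refine List.map_congr_left (fun w _ => ?_)
        simp [PySem.Str.len_eq, String.toList_ofList]
      rw [hmap, hwords, pv_splitOn_eq]
      simpa using (pv_join_mask movie.toList).symm
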